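-- pv_equiv track=rewrite | github.com/UCLA-Security-and-Privacy-Lab/Cosmic | WebformExtraction/webarena/browser_env/info.py | _filter_outer_xpaths
-- ===== SOURCE A (Python) =====
-- def _filter_outer_xpaths(xpath_dict)->dict:
--     '''
--         The XPath dict is dict {xpath: outerhtml}
--     '''
--     xpaths = sorted(list(xpath_dict.keys()), key=lambda x: x.count('/'))
--     outer_xpaths = []
--
--     for xpath in xpaths:
--         if not any(xpath.startswith(outer_xpath + '/') for outer_xpath in outer_xpaths):
--             outer_xpaths.append(xpath)
--     filtered_dict = {key: xpath_dict[key] for key in outer_xpaths}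
--
--     return filtered_dict
-- ===== SOURCE B (Python) =====
-- def _filter_outer_xpaths(xpath_dict)->dict:
--     '''
--         The XPath dict is dict {xpath: outerhtml}
--     '''
--     kept = set()
--     order = []
--     for xpath in sorted(xpath_dict, key=lambda x: x.count('/')):
--         # test each proper '/'-delimited ancestor prefix against the kept set
--         prefix = ''
--         covered = False
--         for ch in xpath:
--             if ch == '/' and prefix in kept:
--                 covered = True
--                 break
--             prefix += ch
--         if not covered:
--             kept.add(xpath)
--             order.append(xpath)
--     return {key: xpath_dict[key] for key in order}
-- ===== Notes on version B (the rewrite author's own statement) =====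
-- stated objective: faster
-- what changed: Instead of testing each xpath with startswith against every already-kept xpath, B keeps the kept xpaths in a hash set and for each xpath checks only its '/'-delimited ancestor prefixes for membership, removing the inner scan over the kept list.
import Mathlib
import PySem

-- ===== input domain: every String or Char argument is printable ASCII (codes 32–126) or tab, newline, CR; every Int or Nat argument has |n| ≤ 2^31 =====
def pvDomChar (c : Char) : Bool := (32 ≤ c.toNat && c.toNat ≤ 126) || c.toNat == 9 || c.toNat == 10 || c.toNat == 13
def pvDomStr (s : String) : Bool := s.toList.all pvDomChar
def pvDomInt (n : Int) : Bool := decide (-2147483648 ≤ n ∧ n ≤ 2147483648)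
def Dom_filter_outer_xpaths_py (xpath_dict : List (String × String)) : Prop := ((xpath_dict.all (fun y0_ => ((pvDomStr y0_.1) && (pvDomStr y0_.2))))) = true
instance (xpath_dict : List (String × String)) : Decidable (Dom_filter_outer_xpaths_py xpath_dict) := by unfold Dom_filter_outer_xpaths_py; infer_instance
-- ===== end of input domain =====

-- B replaces A's inner startswith-scan over all kept xpaths by membership tests of the
-- xpath's '/'-delimited ancestor prefixes in a set of kept xpaths (objective: faster).

-- ===== PORT A =====
-- xpath.startswith(outer_xpath + '/'): the concatenation is done exactly on code-point lists
def pyStartswithSlash (xpath outer : String) : Bool :=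
  PySem.Chars.startswith xpath.toList (outer.toList ++ ['/'])

def filter_outer_xpaths_py (xpath_dict : List (String × String)) : List (String × String) :=
  let d := PySem.Dict.ofList xpath_dict
  let xpaths := PySem.List.sorted (PySem.Dict.keys d) (fun x => (PySem.Str.count x "/" : Int)) false
  let outer_xpaths := xpaths.foldl
    (fun acc xpath => if acc.any (fun outer => pyStartswithSlash xpath outer) then acc else acc ++ [xpath]) []
  -- {key: xpath_dict[key] for key in outer_xpaths}; every key is in d, so get? is always some
  (outer_xpaths.foldl (fun fd k => PySem.Dict.insert fd k ((PySem.Dict.get? d k).getD "")) PySem.Dict.empty).items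

-- ===== PORT B =====
-- inner loop of B: walk the xpath's chars, growing prefix; stop when a '/'-prefix is in kept
def altCovered (kept : PySem.Set String) (pre : List Char) : List Char → Bool
  | [] => false
  | c :: cs =>
    if c == '/' && PySem.Set.contains kept (String.ofList pre) then true
    else altCovered kept (pre ++ [c]) cs

def filter_outer_xpaths_py_alt (xpath_dict : List (String × String)) : List (String × String) :=
  let d := PySem.Dict.ofList xpath_dict
  let st := (PySem.List.sorted (PySem.Dict.keys d) (fun x => (PySem.Str.count x "/" : Int)) false).foldl
    (fun (st : PySem.Set String × List String) xpath =>
      if altCovered st.1 [] xpath.toList then st else (PySem.Set.add st.1 xpath, st.2 ++ [xpath]))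
    (PySem.Set.empty, [])
  (st.2.foldl (fun fd k => PySem.Dict.insert fd k ((PySem.Dict.get? d k).getD "")) PySem.Dict.empty).items

-- ===== PRECONDITION & SPEC =====
def Spec_filter_outer_xpaths_py (xpath_dict : List (String × String)) (out : List (String × String)) : Prop := out = filter_outer_xpaths_py_alt xpath_dict
instance (xpath_dict : List (String × String)) (out : List (String × String)) : Decidable (Spec_filter_outer_xpaths_py xpath_dict out) := by unfold Spec_filter_outer_xpaths_py; infer_instance

-- ===== CLAIM (what is proved, stated in full; the proofs are below) =====
def Claim_equal_filter_outer_xpaths_py : Prop := ∀ (xpath_dict : List (String × String)), Dom_filter_outer_xpaths_py xpath_dict → Spec_filter_outer_xpaths_py xpath_dict (filter_outer_xpaths_py xpath_dict)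

-- ===== LEMMAS AND PROOFS =====

-- (y ++ ['/']) is a prefix of x  ↔  x has '/' at some i with x.take i = y
lemma append_slash_prefix (y x : List Char) :
    ((y ++ ['/']) <+: x) ↔ ∃ i, ∃ h : i < x.length, x[i] = '/' ∧ x.take i = y := by
  constructor
  · rintro ⟨t, rfl⟩
    refine ⟨y.length, by simp, ?_, ?_⟩
    · simp
    · simp
  · rintro ⟨i, h, hc, rfl⟩
    refine ⟨x.drop (i + 1), ?_⟩
    have hd : x.drop i = x[i] :: x.drop (i + 1) := List.drop_eq_getElem_cons h
    calc (x.take i ++ ['/']) ++ x.drop (i + 1)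
        = x.take i ++ ('/' :: x.drop (i + 1)) := by simp
      _ = x.take i ++ x.drop i := by rw [hd, hc]
      _ = x := List.take_append_drop i x

lemma altCovered_spec (cs : List Char) (kept : PySem.Set String) (acc : List Char) :
    altCovered kept acc cs = true ↔
      ∃ i, ∃ h : i < cs.length, cs[i] = '/' ∧ String.ofList (acc ++ cs.take i) ∈ kept := by
  induction cs generalizing acc with
  | nil => simp [altCovered]
  | cons c cs ih =>
    rw [altCovered]
    by_cases hc : (c == '/' && PySem.Set.contains kept (String.ofList acc)) = true
    · rw [if_pos hc]
      simp only [Bool.and_eq_true, beq_iff_eq, PySem.Set.contains_iff] at hc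
      simp only [true_iff]
      exact ⟨0, by simp, by simpa using hc.1, by simpa using hc.2⟩
    · rw [if_neg hc, ih]
      constructor
      · rintro ⟨i, h, h1, h2⟩
        exact ⟨i + 1, by simpa using h, by simpa using h1, by simpa using h2⟩
      · rintro ⟨i, h, h1, h2⟩
        cases i with
        | zero =>
          exfalso
          apply hc
          simp only [Bool.and_eq_true, beq_iff_eq, PySem.Set.contains_iff]
          exact ⟨by simpa using h1, by simpa using h2⟩
        | succ i =>
          exact ⟨i, by simpa using h, by simpa using h1, by simpa using h2⟩

lemma any_startswith_spec (order : List String) (x : List Char) :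
    (order.any (fun y => PySem.Chars.startswith x (y.toList ++ ['/'])) = true) ↔
      ∃ i, ∃ h : i < x.length, x[i] = '/' ∧ String.ofList (x.take i) ∈ order := by
  simp only [List.any_eq_true, PySem.Chars.startswith_iff, append_slash_prefix]
  constructor
  · rintro ⟨y, hy, i, h, h1, h2⟩
    refine ⟨i, h, h1, ?_⟩
    have : String.ofList (x.take i) = y := by rw [h2]; simp
    rwa [this]
  · rintro ⟨i, h, h1, h2⟩
    exact ⟨String.ofList (x.take i), h2, i, h, h1, by simp⟩

lemma loop_eq (l : List String) (kept : PySem.Set String) (order : List String)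
    (hmem : ∀ s : String, s ∈ kept ↔ s ∈ order) :
    (l.foldl (fun (st : PySem.Set String × List String) xpath =>
        if altCovered st.1 [] xpath.toList then st
        else (PySem.Set.add st.1 xpath, st.2 ++ [xpath])) (kept, order)).2
      = l.foldl (fun acc xpath =>
          if acc.any (fun outer => pyStartswithSlash xpath outer) then acc else acc ++ [xpath]) order := by
  induction l generalizing kept order with
  | nil => simp
  | cons x l ih =>
    simp only [List.foldl_cons]
    have hcond : altCovered kept [] x.toList
        = order.any (fun outer => pyStartswithSlash x outer) := by
      rw [Bool.eq_iff_iff, altCovered_spec]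
      unfold pyStartswithSlash
      rw [any_startswith_spec]
      simp only [List.nil_append, hmem]
    rw [hcond]
    by_cases hb : order.any (fun outer => pyStartswithSlash x outer) = true
    · rw [if_pos hb, if_pos hb]
      exact ih kept order hmem
    · rw [if_neg hb, if_neg hb]
      refine ih _ _ ?_
      intro s
      rw [PySem.Set.mem_add, List.mem_append, List.mem_singleton, hmem]

-- ===== VERDICT (by name: the statement is the Claim_ definition above) =====
theorem filter_outer_xpaths_py_spec : Claim_equal_filter_outer_xpaths_py := by
  intro xs _
  unfold Spec_filter_outer_xpaths_py filter_outer_xpaths_py filter_outer_xpaths_py_alt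
  simp only []
  rw [loop_eq _ PySem.Set.empty [] (by simp [PySem.Set.empty])]
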